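-- pv_equiv track=rewrite | github.com/arinsoni/NvBackend | application.py | count_english
-- ===== SOURCE A (Python) =====
-- def count_english(txt):
--     # counts max contiguous english words in the txt
--     if txt == "":
--         return 0
--     words = txt.split(" ")
--     max_count = 0
--     count = 0
--     for word in words:
--         if word.upper().isupper():
--           count += 1
--         else:
--           max_count = max(count, max_count)
--           count = 0
--     max_count = max(count, max_count)
--     count = 0
--     return max_count
-- ===== SOURCE B (Python) =====
-- def count_english(txt):
--     # run-length encode the english/non-english flags, then take the longest english run
--     if txt == "":
--         return 0
--     flags = [w.upper().isupper() for w in txt.split(" ")]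
--     runs = []
--     cur, n = flags[0], 1
--     for f in flags[1:]:
--         if f == cur:
--             n += 1
--         else:
--             runs.append((cur, n))
--             cur, n = f, 1
--     runs.append((cur, n))
--     return max([n for k, n in runs if k], default=0)
-- ===== Notes on version B (the rewrite author's own statement) =====
-- stated objective: alternative
-- what changed: B replaces A's increment/reset/running-max state machine with a two-phase pass: run-length encode the per-word english flags, then take the maximum length among the english runs.
import Mathlib
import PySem

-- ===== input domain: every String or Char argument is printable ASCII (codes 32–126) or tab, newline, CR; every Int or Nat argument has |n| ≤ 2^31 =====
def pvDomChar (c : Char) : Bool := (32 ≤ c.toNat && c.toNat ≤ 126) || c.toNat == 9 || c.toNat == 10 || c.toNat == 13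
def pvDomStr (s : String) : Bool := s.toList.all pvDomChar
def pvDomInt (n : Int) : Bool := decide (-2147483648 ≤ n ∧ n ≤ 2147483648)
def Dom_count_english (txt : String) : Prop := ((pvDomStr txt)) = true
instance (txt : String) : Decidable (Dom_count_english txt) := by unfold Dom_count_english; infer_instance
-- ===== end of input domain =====

-- B run-length encodes the english flags and takes the longest english run, instead of A's count/reset/running-max state machine; same cost, different decomposition.

-- ===== PORT A =====
-- w.upper().isupper(): exact on the ASCII domain, where isupper = (has a cased char) ∧ (no lowercase char)
def pvIsEnglish (w : String) : Bool :=
  let u := (PySem.Str.upper w).toList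
  u.any PySem.Chars.isupper && !u.any PySem.Chars.islower

-- A's for-loop over words carrying (max_count, count), with the trailing max(count, max_count)
def pvLoopA : List String → Int → Int → Int
  | [], maxCount, count => max count maxCount
  | w :: ws, maxCount, count =>
    if pvIsEnglish w then pvLoopA ws maxCount (count + 1)
    else pvLoopA ws (max count maxCount) 0

def count_english (txt : String) : Int :=
  if txt = "" then 0
  else pvLoopA ((PySem.Str.split? txt " ").getD []) 0 0

-- ===== PORT B =====
-- Source B's run-length-encoding loop: state (cur, n), emitting a (flag, runLength) pair at each flag change
def pvGroupAux : List Bool → Bool → Int → List (Bool × Int)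
  | [], cur, n => [(cur, n)]
  | f :: fs, cur, n =>
    if f == cur then pvGroupAux fs cur (n + 1)
    else (cur, n) :: pvGroupAux fs f 1

def count_english_alt (txt : String) : Int :=
  if txt = "" then 0
  else
    match ((PySem.Str.split? txt " ").getD []).map pvIsEnglish with
    | [] => 0  -- unreachable (split of a nonempty string is nonempty); totality guard only
    | f :: fs =>
      let runs := pvGroupAux fs f 1
      (runs.filterMap (fun kn : Bool × Int => if kn.1 then some kn.2 else none)).foldl max 0

-- ===== PRECONDITION & SPEC =====
def Spec_count_english (txt : String) (out : Int) : Prop := out = count_english_alt txt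
instance (txt : String) (out : Int) : Decidable (Spec_count_english txt out) := by unfold Spec_count_english; infer_instance

-- ===== CLAIM (what is proved, stated in full; the proofs are below) =====
def Claim_equal_count_english : Prop := ∀ (txt : String), Dom_count_english txt → Spec_count_english txt (count_english txt)

-- ===== LEMMAS AND PROOFS =====

-- A's loop with the word predicate already mapped away
def pvLoopF : List Bool → Int → Int → Int
  | [], m, c => max c m
  | f :: fs, m, c =>
    if f then pvLoopF fs m (c + 1)
    else pvLoopF fs (max c m) 0

theorem pvLoopA_eq_loopF : ∀ (ws : List String) (m c : Int),
    pvLoopA ws m c = pvLoopF (ws.map pvIsEnglish) m c := by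
  intro ws
  induction ws with
  | nil => intro m c; rfl
  | cons w ws ih =>
    intro m c
    simp only [pvLoopA, List.map, pvLoopF]
    by_cases h : pvIsEnglish w <;> simp [h, ih]

def pvMaxRuns (l : List (Bool × Int)) (a : Int) : Int :=
  (l.filterMap (fun kn : Bool × Int => if kn.1 then some kn.2 else none)).foldl max a

theorem pvKey : ∀ (fs : List Bool) (n a : Int), 0 ≤ a → 0 ≤ n →
    (pvMaxRuns (pvGroupAux fs true n) a = pvLoopF fs a n) ∧
    (pvMaxRuns (pvGroupAux fs false n) a = pvLoopF fs a 0) := by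
  intro fs
  induction fs with
  | nil =>
    intro n a ha hn
    constructor
    · simp [pvGroupAux, pvMaxRuns, pvLoopF]; omega
    · simp [pvGroupAux, pvMaxRuns, pvLoopF]; omega
  | cons f fs ih =>
    intro n a ha hn
    constructor
    · cases f with
      | true =>
        simpa [pvGroupAux, pvLoopF] using (ih (n + 1) a ha (by omega)).1
      | false =>
        have h2 := (ih 1 (max a n) (by omega) (by omega)).2
        simp only [pvGroupAux, pvLoopF, Bool.false_eq_true, if_false]
        rw [show max n a = max a n from max_comm n a, ← h2]
        simp [pvMaxRuns]
    · cases f with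
      | true =>
        have h1 := (ih 1 a ha (by omega)).1
        simp only [pvGroupAux, pvLoopF, pvMaxRuns] at h1 ⊢
        simpa using h1
      | false =>
        have h2 := (ih (n + 1) a ha (by omega)).2
        simp only [pvGroupAux, pvLoopF] at h2 ⊢
        rw [show (max (0:Int) a) = a by omega]
        simpa using h2

-- ===== VERDICT (by name: the statement is the Claim_ definition above) =====
theorem count_english_spec : Claim_equal_count_english := by
  intro txt _
  unfold Spec_count_english count_english count_english_alt
  by_cases h : txt = ""
  · simp [h]
  · simp only [h]
    cases hm : ((PySem.Str.split? txt " ").getD []).map pvIsEnglish with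
    | nil =>
      rw [pvLoopA_eq_loopF, hm]
      simp [pvLoopF]
    | cons f fs =>
      rw [pvLoopA_eq_loopF, hm]
      cases f with
      | true =>
        have := (pvKey fs 1 0 (by omega) (by omega)).1
        simpa [pvLoopF, pvMaxRuns] using this.symm
      | false =>
        have := (pvKey fs 1 0 (by omega) (by omega)).2
        simp only [pvLoopF] at this ⊢
        rw [show (max (0:Int) 0) = 0 by omega]
        simpa [pvMaxRuns] using this.symm
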